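-- pv_equiv track=rewrite | github.com/AtharHz/Computer-Network | Encoding/project1.py | unrepeatedBipolar
-- ===== SOURCE A (Python) =====
-- def unrepeatedBipolar(inputSignal):
--     outputSignal=[]
--     flag=False
--     for i in range(len(inputSignal)):
--         if(inputSignal[i]==0):
--                 outputSignal.append(0)
--         else:
--             if(flag):
--                     outputSignal.append(-1)
--                     flag=False
--             else:
--                     outputSignal.append(1)
--                     flag=True
--     return outputSignal
-- ===== SOURCE B (Python) =====
-- def unrepeatedBipolar(inputSignal):
--     positions = [i for i, x in enumerate(inputSignal) if x != 0]
--     outputSignal = [0] * len(inputSignal)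
--     for k, pos in enumerate(positions):
--         outputSignal[pos] = 1 if k % 2 == 0 else -1
--     return outputSignal
-- ===== Notes on version B (the rewrite author's own statement) =====
-- stated objective: alternative
-- what changed: Replaced the single pass threading a boolean flag by a two-phase shape: first collect the indices of all nonzero elements, then build an all-zero output of the same length and assign 1/-1 to those positions by the parity of their rank.
import Mathlib
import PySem

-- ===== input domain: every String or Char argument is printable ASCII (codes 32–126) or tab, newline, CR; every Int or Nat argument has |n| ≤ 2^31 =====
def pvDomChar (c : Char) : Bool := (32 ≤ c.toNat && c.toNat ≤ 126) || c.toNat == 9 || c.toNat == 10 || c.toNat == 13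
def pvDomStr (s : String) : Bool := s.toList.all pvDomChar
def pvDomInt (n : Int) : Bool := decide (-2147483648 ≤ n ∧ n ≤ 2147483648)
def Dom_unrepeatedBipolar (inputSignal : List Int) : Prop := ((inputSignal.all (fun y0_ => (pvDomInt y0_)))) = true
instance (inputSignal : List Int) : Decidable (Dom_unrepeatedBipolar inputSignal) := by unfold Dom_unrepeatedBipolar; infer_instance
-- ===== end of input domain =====

-- B replaces A's single flag-threading pass by a two-phase shape (collect nonzero positions, then assign alternating signs into a zero-filled output); same O(n) cost, alternative decomposition.


-- ===== PORT A =====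
def unrepeatedBipolar (inputSignal : List Int) : List Int :=
  ((PySem.List.pyRange 0 (PySem.List.len inputSignal)).foldl
    (fun (st : List Int × Bool) i =>
      if PySem.List.pyGetD inputSignal i 0 = 0 then (st.1 ++ [0], st.2)
      else if st.2 then (st.1 ++ [-1], false) else (st.1 ++ [1], true))
    ([], false)).1

-- ===== PORT B =====
def unrepeatedBipolar_alt (inputSignal : List Int) : List Int :=
  let positions := ((PySem.List.enumerate inputSignal).filter (fun p => p.2 != 0)).map (fun p => p.1)
  (PySem.List.enumerate positions).foldl
    (fun out kp => PySem.List.pySetD out kp.2 (if PySem.Int.mod kp.1 2 = 0 then 1 else -1))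
    (List.replicate inputSignal.length 0)

-- ===== PRECONDITION & SPEC =====
def Spec_unrepeatedBipolar (inputSignal : List Int) (out : List Int) : Prop := out = unrepeatedBipolar_alt inputSignal
instance (inputSignal : List Int) (out : List Int) : Decidable (Spec_unrepeatedBipolar inputSignal out) := by unfold Spec_unrepeatedBipolar; infer_instance

-- ===== CLAIM (what is proved, stated in full; the proofs are below) =====
def Claim_equal_unrepeatedBipolar : Prop := ∀ (inputSignal : List Int), Dom_unrepeatedBipolar inputSignal → Spec_unrepeatedBipolar inputSignal (unrepeatedBipolar inputSignal)

-- ===== LEMMAS AND PROOFS =====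

/-- Common reference: A's loop as structural recursion with the flag. -/
def pvGo : List Int → Bool → List Int
  | [], _ => []
  | x :: xs, f => if x = 0 then 0 :: pvGo xs f else (if f then -1 else 1) :: pvGo xs (!f)

def pvStepA (st : List Int × Bool) (x : Int) : List Int × Bool :=
  if x = 0 then (st.1 ++ [0], st.2)
  else if st.2 then (st.1 ++ [-1], false) else (st.1 ++ [1], true)

lemma pvFoldA (l : List Int) : ∀ (acc : List Int) (flag : Bool),
    (l.foldl pvStepA (acc, flag)).1 = acc ++ pvGo l flag := by
  induction l with
  | nil => intro acc flag; simp [pvGo]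
  | cons x xs ih =>
    intro acc flag
    by_cases hx : x = 0
    · simp [pvGo, pvStepA, hx, ih]
    · cases flag <;> simp [pvGo, pvStepA, hx, ih]

lemma pvA_eq (l : List Int) : unrepeatedBipolar l = pvGo l false := by
  have h : unrepeatedBipolar l = (l.foldl pvStepA ([], false)).1 := by
    unfold unrepeatedBipolar
    exact congrArg Prod.fst (PySem.List.foldl_pyRange_zero_pyGetD l 0 pvStepA ([], false))
  rw [h, pvFoldA]; simp

lemma pvSetLen {α : Type} (pref : List α) (y : α) (t : List α) (v : α) :
    (pref ++ y :: t).set pref.length v = pref ++ v :: t := by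
  induction pref with
  | nil => simp
  | cons a p ih => simp [ih]

lemma pvB_main (l : List Int) : ∀ (s k : Nat) (pref : List Int), pref.length = s →
    (PySem.List.enumerate
        (((PySem.List.enumerate l (s : Int)).filter (fun p => p.2 != 0)).map (fun p => p.1))
        (k : Int)).foldl
      (fun out kp => PySem.List.pySetD out kp.2 (if PySem.Int.mod kp.1 2 = 0 then 1 else -1))
      (pref ++ List.replicate l.length 0)
    = pref ++ pvGo l (decide (k % 2 = 1)) := by
  induction l with
  | nil => intro s k pref _; simp [PySem.List.enumerate_nil, pvGo]
  | cons x xs ih =>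
    intro s k pref hpref
    rw [PySem.List.enumerate_cons]
    by_cases hx : x = 0
    · have h1 : ((s : Int) + 1) = ((s + 1 : Nat) : Int) := by push_cast; ring
      simp only [List.filter_cons, hx, bne_self_eq_false, List.length_cons,
        List.replicate_succ, pvGo, if_true, h1]
      have := ih (s + 1) k (pref ++ [(0 : Int)]) (by simp [hpref])
      simpa using this
    · have hbne : (x != 0) = true := by simpa using hx
      have h1 : ((s : Int) + 1) = ((s + 1 : Nat) : Int) := by push_cast; ring
      have h2 : ((k : Int) + 1) = ((k + 1 : Nat) : Int) := by push_cast; ring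
      simp only [List.filter_cons, hbne, if_true, List.map_cons,
        PySem.List.enumerate_cons, List.length_cons, List.replicate_succ, h1, h2]
      rw [List.foldl_cons]
      have hv : PySem.Int.mod (k : Int) 2 = ((k % 2 : Nat) : Int) := by
        exact_mod_cast PySem.Int.mod_natCast k 2
      set v : Int := if PySem.Int.mod (k : Int) 2 = 0 then 1 else -1 with hvdef
      have hset : PySem.List.pySetD (pref ++ (0 : Int) :: List.replicate xs.length 0) (s : Int) v
          = (pref ++ [v]) ++ List.replicate xs.length 0 := by
        rw [PySem.List.pySetD_natCast, ← hpref, pvSetLen]; simp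
      rw [hset, ih (s + 1) (k + 1) (pref ++ [v]) (by simp [hpref])]
      have hmod : (k + 1) % 2 = 1 - k % 2 := by omega
      by_cases hk : k % 2 = 0
      · have : v = 1 := by rw [hvdef, hv, hk]; norm_num
        simp [pvGo, hx, this, hk, hmod]
      · have hk1 : k % 2 = 1 := by omega
        have : v = -1 := by rw [hvdef, hv, hk1]; norm_num
        simp [pvGo, hx, this, hk1, hmod]

lemma pvB_eq (l : List Int) : unrepeatedBipolar_alt l = pvGo l false := by
  have := pvB_main l 0 0 [] rfl
  simpa [unrepeatedBipolar_alt] using this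

-- ===== VERDICT (by name: the statement is the Claim_ definition above) =====
theorem unrepeatedBipolar_spec : Claim_equal_unrepeatedBipolar := by
  intro l _
  unfold Spec_unrepeatedBipolar
  rw [pvA_eq, pvB_eq]
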